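-- pv_equiv track=rewrite | github.com/yaxuanm/Sarah-CPA | src/duedatehq/http_api.py | _message_chunks
-- ===== SOURCE A (Python) =====
-- def _message_chunks(message: str, chunk_size: int = 48) -> list[str]:
--     if not message:
--         return []
--     chunks = []
--     start = 0
--     natural_breaks = set("。！？；;.!?\n")
--     min_chunk = max(12, chunk_size // 2)
--     while start < len(message):
--         if len(message) - start <= chunk_size:
--             chunks.append(message[start:])
--             break
--
--         target = min(start + chunk_size, len(message))
--         split_at = None
--         for index in range(target, start + min_chunk, -1):
--             if message[index - 1] in natural_breaks:
--                 split_at = index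
--                 break
--         if split_at is None:
--             lookahead_end = min(len(message), target + 24)
--             for index in range(target, lookahead_end):
--                 if message[index] in natural_breaks:
--                     split_at = index + 1
--                     break
--         if split_at is None or split_at <= start:
--             split_at = target
--         chunks.append(message[start:split_at])
--         start = split_at
--     return chunks
-- ===== SOURCE B (Python) =====
-- # B: precompute the sorted list of natural-break positions in one pass, then choose each
-- # split by walking a single advancing cursor over that index list (largest usable break
-- # below the target / first break at or past it) instead of re-scanning message characters
-- # around every chunk boundary. One O(n) scan + O(1) amortized work per break.
-- _NATURAL_BREAKS = "\u3002\uff01\uff1f\uff1b;.!?\n"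
--
--
-- def _message_chunks(message: str, chunk_size: int = 48) -> list[str]:
--     if not message:
--         return []
--     breaks = [i for i, ch in enumerate(message) if ch in _NATURAL_BREAKS]
--     n = len(message)
--     min_chunk = max(12, chunk_size // 2)
--     chunks = []
--     start = 0
--     k = 0  # breaks[:k] are behind every window that can still matter
--     while start < n:
--         if n - start <= chunk_size:
--             chunks.append(message[start:])
--             break
--         target = min(start + chunk_size, n)
--         lo = start + min_chunk
--         while k < len(breaks) and breaks[k] < min(lo, target):
--             k += 1
--         before = None  # largest remaining break index < target
--         i = k
--         while i < len(breaks) and breaks[i] < target: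
--             before = breaks[i]
--             i += 1
--         if before is not None and before >= lo:
--             split_at = before + 1
--         elif i < len(breaks) and breaks[i] < min(n, target + 24):
--             split_at = breaks[i] + 1
--         else:
--             split_at = target
--         chunks.append(message[start:split_at])
--         start = split_at
--     return chunks
-- ===== Notes on version B (the rewrite author's own statement) =====
-- stated objective: alternative
-- what changed: B precomputes the sorted list of natural-break positions in one pass and picks each split point by advancing a cursor over that index list (largest usable break below the target, else first break at/past it), instead of A's per-chunk backward/forward character scans; the identical tail-append and fallback-to-target guards are kept.
-- outside the precondition, e.g. on _message_chunks('ab.cd.', 0): A returns ['ab.', 'cd.'], B returns ['ab.', 'cd.']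
import Mathlib
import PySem

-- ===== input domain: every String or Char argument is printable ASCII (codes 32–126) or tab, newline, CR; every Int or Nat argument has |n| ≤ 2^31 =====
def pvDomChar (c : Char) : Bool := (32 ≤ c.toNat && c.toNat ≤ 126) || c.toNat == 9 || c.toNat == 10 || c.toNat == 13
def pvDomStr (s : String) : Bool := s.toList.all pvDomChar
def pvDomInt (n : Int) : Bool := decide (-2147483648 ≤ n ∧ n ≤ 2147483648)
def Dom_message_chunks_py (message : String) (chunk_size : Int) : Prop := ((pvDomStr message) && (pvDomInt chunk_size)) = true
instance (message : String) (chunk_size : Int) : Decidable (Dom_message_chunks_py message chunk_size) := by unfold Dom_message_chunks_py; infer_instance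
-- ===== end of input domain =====

-- B replaces A's per-chunk backward/forward character scans by one precomputed sorted list
-- of break positions walked with an advancing cursor (alternative algorithm, same values).


-- ===== PORT A =====
-- shared constant: membership in the natural_breaks set "。！？；;.!?\n"
def isBreakChar (c : Char) : Bool :=
  c == '。' || c == '！' || c == '？' || c == '；' || c == ';' || c == '.' || c == '!' || c == '?' || c == '\n'

-- message[i]; under Pre_ every index the loops read is in range, so the ' ' default
-- (not a break char) is never the decisive value.
def getC (chars : List Char) (i : Int) : Char := PySem.List.pyGetD chars i ' '

-- the while-loop of A; fuel (length+1) suffices under Pre_ since start strictly increases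
def aChunkLoop (chars : List Char) (msg : String) (cs minc : Int) :
    Nat → Int → List String → List String
  | 0, _, chunks => chunks
  | fuel+1, start, chunks =>
    if start < (chars.length : Int) then
      if (chars.length : Int) - start ≤ cs then
        chunks ++ [PySem.Str.slice msg (some start) none]
      else
        let target := min (start + cs) (chars.length : Int)
        let s1 := (PySem.List.pyRange target (start + minc) (-1)).find?
            (fun i => isBreakChar (getC chars (i - 1)))
        let s2 := match s1 with
          | some i => some i
          | none =>
            ((PySem.List.pyRange target (min (chars.length : Int) (target + 24)) 1).find?
                (fun i => isBreakChar (getC chars i))).map (· + 1)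
        let split := match s2 with
          | none => target
          | some s => if s ≤ start then target else s
        aChunkLoop chars msg cs minc fuel split
          (chunks ++ [PySem.Str.slice msg (some start) (some split)])
    else chunks

def message_chunks_py (message : String) (chunk_size : Int) : List String :=
  if message = "" then []
  else
    aChunkLoop message.toList message chunk_size (max 12 (PySem.Int.floordiv chunk_size 2))
      (message.toList.length + 1) 0 []

-- ===== PORT B =====
-- [i for i, ch in enumerate(message) if ch in _NATURAL_BREAKS]
def breakIndices (chars : List Char) : List Int :=
  (PySem.List.enumerate chars).filterMap
    (fun ic => if isBreakChar ic.2 then some ic.1 else none)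

-- while k < len(breaks) and breaks[k] < bound: k += 1
def skipWhileLt (bs : List Int) (bound : Int) (k : Nat) : Nat :=
  if h : k < bs.length then
    if bs[k] < bound then skipWhileLt bs bound (k+1) else k
  else k
termination_by bs.length - k

-- while i < len(breaks) and breaks[i] < target: before = breaks[i]; i += 1
def scanWhileLt (bs : List Int) (target : Int) (i : Nat) (before : Option Int) :
    Option Int × Nat :=
  if h : i < bs.length then
    if bs[i] < target then scanWhileLt bs target (i+1) (some bs[i]) else (before, i)
  else (before, i)
termination_by bs.length - i

-- elif i < len(breaks) and breaks[i] < min(n, target + 24): ... else: target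
def bAfter (bs : List Int) (n target : Int) (i : Nat) : Int :=
  if h : i < bs.length then
    if bs[i] < min n (target + 24) then bs[i] + 1 else target
  else target

-- the while-loop of B; same fuel as A's loop
def bChunkLoop (bs : List Int) (msg : String) (n cs minc : Int) :
    Nat → Int → Nat → List String → List String
  | 0, _, _, chunks => chunks
  | fuel+1, start, k, chunks =>
    if start < n then
      if n - start ≤ cs then chunks ++ [PySem.Str.slice msg (some start) none]
      else
        let target := min (start + cs) n
        let lo := start + minc
        let k' := skipWhileLt bs (min lo target) k
        let bi := scanWhileLt bs target k' none
        let split :=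
          match bi.1 with
          | some b => if lo ≤ b then b + 1 else bAfter bs n target bi.2
          | none => bAfter bs n target bi.2
        bChunkLoop bs msg n cs minc fuel split k'
          (chunks ++ [PySem.Str.slice msg (some start) (some split)])
    else chunks

def message_chunks_py_alt (message : String) (chunk_size : Int) : List String :=
  if message = "" then []
  else
    bChunkLoop (breakIndices message.toList) message (message.toList.length)
      chunk_size (max 12 (PySem.Int.floordiv chunk_size 2))
      (message.toList.length + 1) 0 0 []

-- ===== PRECONDITION & SPEC =====
-- Pre_ excludes nonempty messages with chunk_size < 1: there A loops forever or raises
-- IndexError through negative lookahead indexing (only on some break-dense messages does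
-- it return at all; on the cited one B returns the same chunks).
def Pre_message_chunks_py (message : String) (chunk_size : Int) : Prop :=
  message = "" ∨ 1 ≤ chunk_size
instance (message : String) (chunk_size : Int) : Decidable (Pre_message_chunks_py message chunk_size) := by unfold Pre_message_chunks_py; infer_instance

def pvWitness_message_chunks_py : String × Int :=
  ("A short sentence. Another one follows here! ok", 16)

def Spec_message_chunks_py (message : String) (chunk_size : Int) (out : List String) : Prop := out = message_chunks_py_alt message chunk_size
instance (message : String) (chunk_size : Int) (out : List String) : Decidable (Spec_message_chunks_py message chunk_size out) := by unfold Spec_message_chunks_py; infer_instance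

-- ===== CLAIM (what is proved, stated in full; the proofs are below) =====
def Claim_equal_message_chunks_py : Prop := ∀ (message : String) (chunk_size : Int), Dom_message_chunks_py message chunk_size → Pre_message_chunks_py message chunk_size → Spec_message_chunks_py message chunk_size (message_chunks_py message chunk_size)

-- ===== LEMMAS AND PROOFS =====

-- membership and sortedness of the precomputed break list
theorem mem_breakIndices (chars : List Char) (j : Int) :
    j ∈ breakIndices chars ↔
      0 ≤ j ∧ j < (chars.length : Int) ∧ isBreakChar (getC chars j) = true := by
  unfold breakIndices
  rw [List.mem_filterMap]
  constructor
  · rintro ⟨⟨a, c⟩, hmem, hf⟩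
    rw [PySem.List.mem_enumerate_iff] at hmem
    obtain ⟨k, hk, heq⟩ := hmem
    rw [Prod.mk.injEq] at heq
    obtain ⟨ha, hc⟩ := heq
    simp only at hf
    split_ifs at hf with hb
    cases hf
    refine ⟨by omega, by omega, ?_⟩
    rw [getC, PySem.List.pyGetD_eq_getElem chars ' ' (by omega) (by omega)]
    have hjk : j.toNat = k := by omega
    simp only [hjk]
    exact hc ▸ hb
  · rintro ⟨h0, hlen, hq⟩
    refine ⟨(j, chars[j.toNat]'(by omega)), ?_, ?_⟩
    · rw [PySem.List.mem_enumerate_iff]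
      exact ⟨j.toNat, by omega, by simp; omega⟩
    · rw [getC, PySem.List.pyGetD_eq_getElem chars ' ' h0 hlen] at hq
      simp [hq]

theorem pairwise_breakIndices (chars : List Char) :
    (breakIndices chars).Pairwise (· < ·) := by
  unfold breakIndices
  rw [List.pairwise_filterMap]
  apply List.Pairwise.imp ?_ (PySem.List.pairwise_lt_enumerate chars 0)
  intro a b hab x hx y hy
  split_ifs at hx hy; simp_all

theorem find_desc_some (q : Int → Bool) :
    ∀ (d : Nat) (t lo v : Int), (t - lo).toNat ≤ d →
      ((PySem.List.pyRange t lo (-1)).find? (fun i => q (i - 1)) = some v) →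
      lo < v ∧ v ≤ t ∧ q (v - 1) = true ∧ ∀ i', v < i' → i' ≤ t → q (i' - 1) = false := by
  intro d
  induction d with
  | zero =>
    intro t lo v hd hf
    rw [PySem.List.pyRange_neg_one_eq_nil (by omega)] at hf
    simp at hf
  | succ d ih =>
    intro t lo v hd hf
    by_cases hle : t ≤ lo
    · rw [PySem.List.pyRange_neg_one_eq_nil hle] at hf
      simp at hf
    · rw [PySem.List.pyRange_neg_one_cons (by omega), List.find?_cons] at hf
      by_cases hq : q (t - 1) = true
      · simp only [hq] at hf
        cases hf
        exact ⟨by omega, le_rfl, hq, fun i' h1 h2 => by omega⟩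
      · simp only [Bool.not_eq_true] at hq
        simp only [hq] at hf
        obtain ⟨h1, h2, h3, h4⟩ := ih (t-1) lo v (by omega) hf
        refine ⟨h1, by omega, h3, ?_⟩
        intro i' hv ht
        rcases eq_or_lt_of_le ht with rfl | hlt
        · exact hq
        · exact h4 i' hv (by omega)

theorem find_desc_none (q : Int → Bool) :
    ∀ (d : Nat) (t lo : Int), (t - lo).toNat ≤ d →
      ((PySem.List.pyRange t lo (-1)).find? (fun i => q (i - 1)) = none) →
      ∀ i, lo < i → i ≤ t → q (i - 1) = false := by
  intro d
  induction d with
  | zero => intro t lo hd _ i h1 h2; omega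
  | succ d ih =>
    intro t lo hd hf i h1 h2
    by_cases hle : t ≤ lo
    · omega
    · rw [PySem.List.pyRange_neg_one_cons (by omega), List.find?_cons] at hf
      by_cases hq : q (t - 1) = true
      · simp [hq] at hf
      · simp only [Bool.not_eq_true] at hq
        simp only [hq] at hf
        rcases eq_or_lt_of_le h2 with rfl | hlt
        · exact hq
        · exact ih (t-1) lo (by omega) hf i h1 (by omega)

theorem find_asc_some (q : Int → Bool) :
    ∀ (d : Nat) (t e w : Int), (e - t).toNat ≤ d →
      ((PySem.List.pyRange t e).find? (fun i => q i) = some w) →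
      t ≤ w ∧ w < e ∧ q w = true ∧ ∀ i', t ≤ i' → i' < w → q i' = false := by
  intro d
  induction d with
  | zero =>
    intro t e w hd hf
    rw [PySem.List.pyRange_one_eq_nil (by omega)] at hf
    simp at hf
  | succ d ih =>
    intro t e w hd hf
    by_cases hle : e ≤ t
    · rw [PySem.List.pyRange_one_eq_nil hle] at hf
      simp at hf
    · rw [PySem.List.pyRange_one_cons (by omega), List.find?_cons] at hf
      by_cases hq : q t = true
      · simp only [hq] at hf
        cases hf
        exact ⟨le_rfl, by omega, hq, fun i' h1 h2 => by omega⟩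
      · simp only [Bool.not_eq_true] at hq
        simp only [hq] at hf
        obtain ⟨h1, h2, h3, h4⟩ := ih (t+1) e w (by omega) hf
        refine ⟨by omega, h2, h3, ?_⟩
        intro i' ht hw
        rcases eq_or_lt_of_le ht with rfl | hlt
        · exact hq
        · exact h4 i' (by omega) hw

theorem find_asc_none (q : Int → Bool) :
    ∀ (d : Nat) (t e : Int), (e - t).toNat ≤ d →
      ((PySem.List.pyRange t e).find? (fun i => q i) = none) →
      ∀ i, t ≤ i → i < e → q i = false := by
  intro d
  induction d with
  | zero => intro t e hd _ i h1 h2; omega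
  | succ d ih =>
    intro t e hd hf i h1 h2
    by_cases hle : e ≤ t
    · omega
    · rw [PySem.List.pyRange_one_cons (by omega), List.find?_cons] at hf
      by_cases hq : q t = true
      · simp [hq] at hf
      · simp only [Bool.not_eq_true] at hq
        simp only [hq] at hf
        rcases eq_or_lt_of_le h1 with rfl | hlt
        · exact hq
        · exact ih (t+1) e (by omega) hf i (by omega) h2

theorem skipWhileLt_spec (bs : List Int) (bound : Int) (k : Nat) :
      k ≤ skipWhileLt bs bound k ∧ skipWhileLt bs bound k ≤ max k bs.length ∧
      (∀ m (hm : m < bs.length), k ≤ m → m < skipWhileLt bs bound k → bs[m] < bound) ∧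
      (∀ x, bs[skipWhileLt bs bound k]? = some x → ¬ x < bound) := by
  fun_induction skipWhileLt bs bound k with
  | case1 k h hlt ih =>
    obtain ⟨ih1, ih2, ih3, ih4⟩ := ih
    refine ⟨by omega, by omega, ?_, ih4⟩
    intro m hm hkm hmr
    rcases Nat.eq_or_lt_of_le hkm with rfl | hlt2
    · exact hlt
    · exact ih3 m hm hlt2 hmr
  | case2 k h hlt =>
    refine ⟨le_rfl, by omega, by omega, ?_⟩
    intro x hx
    rw [List.getElem?_eq_getElem h] at hx
    cases hx; exact hlt
  | case3 k h =>
    refine ⟨le_rfl, by omega, by omega, ?_⟩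
    intro x hx
    rw [List.getElem?_eq_none_iff.mpr (by omega)] at hx
    cases hx

theorem scanWhileLt_spec (bs : List Int) (target : Int) (i : Nat) (acc : Option Int) :
      i ≤ (scanWhileLt bs target i acc).2 ∧
      (scanWhileLt bs target i acc).2 ≤ max i bs.length ∧
      (∀ m (hm : m < bs.length), i ≤ m → m < (scanWhileLt bs target i acc).2 →
        bs[m] < target) ∧
      (∀ x, bs[(scanWhileLt bs target i acc).2]? = some x → ¬ x < target) ∧
      (((scanWhileLt bs target i acc).1 = acc ∧ (scanWhileLt bs target i acc).2 = i) ∨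
        (i < (scanWhileLt bs target i acc).2 ∧ ∃ x,
          bs[(scanWhileLt bs target i acc).2 - 1]? = some x ∧
          (scanWhileLt bs target i acc).1 = some x)) := by
  fun_induction scanWhileLt bs target i acc with
  | case1 i acc h hlt ih =>
    obtain ⟨ih1, ih2, ih3, ih4, ih5⟩ := ih
    refine ⟨by omega, by omega, ?_, ih4, ?_⟩
    · intro m hm him hmr
      rcases Nat.eq_or_lt_of_le him with rfl | hlt2
      · exact hlt
      · exact ih3 m hm hlt2 hmr
    · rcases ih5 with ⟨h1, h2⟩ | ⟨h1, x, h2, h3⟩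
      · right
        refine ⟨by omega, bs[i], ?_, h1⟩
        rw [h2]
        simp [List.getElem?_eq_getElem h]
      · exact Or.inr ⟨by omega, x, h2, h3⟩
  | case2 i acc h hlt =>
    refine ⟨le_rfl, by omega, by omega, ?_, Or.inl ⟨rfl, rfl⟩⟩
    intro x hx
    rw [List.getElem?_eq_getElem h] at hx
    cases hx; exact hlt
  | case3 i acc h =>
    refine ⟨le_rfl, by omega, by omega, ?_, Or.inl ⟨rfl, rfl⟩⟩
    intro x hx
    rw [List.getElem?_eq_none_iff.mpr (by omega)] at hx
    cases hx

theorem loop_eq (chars : List Char) (msg : String) (cs minc : Int)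
    (hcs : 1 ≤ cs) (hminc : 12 ≤ minc) :
    ∀ (fuel : Nat) (start : Int) (k : Nat) (chunks : List String),
      0 ≤ start → k ≤ (breakIndices chars).length →
      (∀ m (hm : m < (breakIndices chars).length), m < k →
        (breakIndices chars)[m] < min (start + minc) (start + cs)) →
      aChunkLoop chars msg cs minc fuel start chunks =
        bChunkLoop (breakIndices chars) msg (chars.length : Int) cs minc fuel start k chunks := by
  intro fuel
  induction fuel with
  | zero => intros; rfl
  | succ fuel ih =>
    intro start k chunks hs hk hinv
    rw [aChunkLoop, bChunkLoop]
    by_cases h1 : start < (chars.length : Int)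
    · rw [if_pos h1, if_pos h1]
      by_cases h2 : (chars.length : Int) - start ≤ cs
      · rw [if_pos h2, if_pos h2]
      · rw [if_neg h2, if_neg h2]
        simp only []
        have hlen : start + cs < (chars.length : Int) := by omega
        have htA : min (start + cs) (chars.length : Int) = start + cs := by omega
        rw [htA]
        set bs := breakIndices chars with hbsdef
        set k' := skipWhileLt bs (min (start + minc) (start + cs)) k with hk'def
        set pr := scanWhileLt bs (start + cs) k' none with hprdef
        set f1 := List.find? (fun i => isBreakChar (getC chars (i - 1)))
            (PySem.List.pyRange (start + cs) (start + minc) (-1)) with hf1def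
        set f2 := List.find? (fun i => isBreakChar (getC chars i))
            (PySem.List.pyRange (start + cs) (min ((chars.length : Int)) (start + cs + 24))) with hf2def
        have hsort : ∀ (m1 m2 : Nat) (h1 : m1 < bs.length) (h2 : m2 < bs.length),
            m1 < m2 → bs[m1] < bs[m2] :=
          List.pairwise_iff_getElem.mp (pairwise_breakIndices chars)
        obtain ⟨hA1, hA2, hA3, hA4⟩ := skipWhileLt_spec bs (min (start + minc) (start + cs)) k
        rw [← hk'def] at hA1 hA2 hA3 hA4
        obtain ⟨hB1, hB2, hB3, hB4, hB5⟩ := scanWhileLt_spec bs (start + cs) k' none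
        rw [← hprdef] at hB1 hB2 hB3 hB4 hB5
        have hmemE : ∀ m (hm : m < bs.length), 0 ≤ bs[m] ∧ bs[m] < (chars.length : Int) ∧
            isBreakChar (getC chars bs[m]) = true := by
          intro m hm
          exact (mem_breakIndices chars bs[m]).mp (List.getElem_mem hm)
        have hmemI : ∀ (j : Int), 0 ≤ j → j < (chars.length : Int) →
            isBreakChar (getC chars j) = true → ∃ m, ∃ (hm : m < bs.length), bs[m] = j := by
          intro j h0 hj hq
          exact List.mem_iff_getElem.mp ((mem_breakIndices chars j).mpr ⟨h0, hj, hq⟩)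
        have hpre2 : ∀ m (hm : m < bs.length), m < k' →
            bs[m] < min (start + minc) (start + cs) := by
          intro m hm hmk
          by_cases hmk2 : m < k
          · exact hinv m hm hmk2
          · exact hA3 m hm (by omega) hmk
        have hk'len : k' ≤ bs.length := by omega
        have hprlen : pr.2 ≤ bs.length := by omega
        clear_value f1 f2
        rcases f1 with _ | v
        · -- A's backward scan found nothing
          have hnone := find_desc_none (fun j => isBreakChar (getC chars j))
            ((start + cs) - (start + minc)).toNat (start + cs) (start + minc) le_rfl hf1def.symm
          -- B's `before`, if any, is below start + min_chunk
          have hpbsmall : ∀ b, pr.1 = some b → b < start + minc := by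
            intro b hpb
            rcases hB5 with ⟨hacc, _⟩ | ⟨hklt, x, hx, hpb2⟩
            · rw [hpb] at hacc; cases hacc
            · have hxm : pr.2 - 1 < bs.length := by omega
              rw [List.getElem?_eq_getElem hxm] at hx
              cases hx
              rw [hpb2] at hpb
              cases hpb
              by_contra hcon
              have hxlt : bs[pr.2 - 1] < start + cs := hB3 (pr.2 - 1) hxm (by omega) (by omega)
              have hq := (hmemE (pr.2 - 1) hxm).2.2
              have := hnone (bs[pr.2 - 1] + 1) (by omega) (by omega)
              simp only [add_sub_cancel_right] at this
              rw [this] at hq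
              cases hq
          -- both sides fall through to the forward lookahead
          have hafter : (match pr.1 with
              | some b => if start + minc ≤ b then b + 1
                else bAfter bs (chars.length : Int) (start + cs) pr.2
              | none => bAfter bs (chars.length : Int) (start + cs) pr.2) =
              bAfter bs (chars.length : Int) (start + cs) pr.2 := by
            rcases hpb : pr.1 with _ | b
            · rfl
            · have := hpbsmall b hpb
              simp only [if_neg (by omega : ¬ start + minc ≤ b)]
          rw [hafter]
          rcases f2 with _ | w
          · -- no break in the lookahead window either: both fall back to target
            have hnone2 := find_asc_none (fun j => isBreakChar (getC chars j))
              ((min ((chars.length : Int)) (start + cs + 24)) - (start + cs)).toNat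
              (start + cs) (min ((chars.length : Int)) (start + cs + 24)) le_rfl hf2def.symm
            have hae : bAfter bs (chars.length : Int) (start + cs) pr.2 = start + cs := by
              rw [bAfter]
              split_ifs with hpp hlt2
              · exfalso
                have ha1 := hB4 bs[pr.2] (List.getElem?_eq_getElem hpp)
                have hq := (hmemE pr.2 hpp).2.2
                have := hnone2 bs[pr.2] (by omega) hlt2
                simp only [] at this
                rw [this] at hq
                cases hq
              · rfl
              · rfl
            rw [hae]
            exact ih (start + cs) k' _ (by omega) hk'len
              (fun m hm hmk => by have := hpre2 m hm hmk; omega)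
          · -- forward scan found w; B's cursor now sits on exactly w
            obtain ⟨hw1, hw2, hw3, hw4⟩ := find_asc_some (fun j => isBreakChar (getC chars j))
              ((min ((chars.length : Int)) (start + cs + 24)) - (start + cs)).toNat
              (start + cs) (min ((chars.length : Int)) (start + cs + 24)) w le_rfl hf2def.symm
            obtain ⟨m, hm, hbm⟩ := hmemI w (by omega) (by omega) hw3
            have hmk' : k' ≤ m := by
              by_contra hcon
              have := hpre2 m hm (by omega)
              omega
            have hmpr : pr.2 ≤ m := by
              by_contra hcon
              have := hB3 m hm (by omega) (by omega)
              omega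
            have hprlt : pr.2 < bs.length := by omega
            have ha1 := hB4 bs[pr.2] (List.getElem?_eq_getElem hprlt)
            have ha2 : bs[pr.2] ≤ w := by
              rcases Nat.eq_or_lt_of_le hmpr with heq | hlt2
              · rw [← hbm]; exact le_of_eq (by simp only [heq])
              · rw [← hbm]; exact le_of_lt (hsort pr.2 m hprlt hm hlt2)
            have haq := (hmemE pr.2 hprlt).2.2
            have haw : bs[pr.2] = w := by
              by_contra hcon
              have := hw4 bs[pr.2] (by omega) (by omega)
              rw [this] at haq
              cases haq
            have hae : bAfter bs (chars.length : Int) (start + cs) pr.2 = w + 1 := by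
              rw [bAfter, dif_pos hprlt, if_pos (by omega), haw]
            rw [hae]
            simp only [Option.map_some]
            rw [if_neg (by omega : ¬ w + 1 ≤ start)]
            exact ih (w + 1) k' _ (by omega) hk'len
              (fun m' hm' hmk => by have := hpre2 m' hm' hmk; omega)
        · -- A's backward scan found v: B's `before` is exactly v - 1
          obtain ⟨hv1, hv2, hv3, hv4⟩ := find_desc_some (fun j => isBreakChar (getC chars j))
            ((start + cs) - (start + minc)).toNat (start + cs) (start + minc) v le_rfl hf1def.symm
          obtain ⟨m, hm, hbm⟩ := hmemI (v - 1) (by omega) (by omega) hv3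
          have hmk' : k' ≤ m := by
            by_contra hcon
            have := hpre2 m hm (by omega)
            omega
          have hmpr : m < pr.2 := by
            by_contra hcon
            have hprl : pr.2 < bs.length := by omega
            have h4 := hB4 bs[pr.2] (List.getElem?_eq_getElem hprl)
            have hle2 : bs[pr.2] ≤ bs[m] := by
              rcases Nat.eq_or_lt_of_le (Nat.le_of_not_lt hcon) with heq | hlt2
              · exact le_of_eq (by simp only [heq])
              · exact le_of_lt (hsort pr.2 m hprl hm hlt2)
            omega
          rcases hB5 with ⟨_, hpr2⟩ | ⟨hklt, x, hx, hpb⟩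
          · omega
          · have hxm : pr.2 - 1 < bs.length := by omega
            rw [List.getElem?_eq_getElem hxm] at hx
            cases hx
            have hxlt : bs[pr.2 - 1] < start + cs := hB3 (pr.2 - 1) hxm (by omega) (by omega)
            have hxge : bs[m] ≤ bs[pr.2 - 1] := by
              rcases Nat.eq_or_lt_of_le (by omega : m ≤ pr.2 - 1) with heq | hlt2
              · exact le_of_eq (by simp only [heq])
              · exact le_of_lt (hsort m (pr.2 - 1) hm hxm hlt2)
            have hxq := (hmemE (pr.2 - 1) hxm).2.2
            have hxeq : bs[pr.2 - 1] = v - 1 := by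
              by_contra hcon
              have := hv4 (bs[pr.2 - 1] + 1) (by omega) (by omega)
              simp only [add_sub_cancel_right] at this
              rw [this] at hxq
              cases hxq
            rw [hpb, hxeq]
            dsimp only
            rw [if_neg (by omega : ¬ v ≤ start), if_pos (by omega : start + minc ≤ v - 1)]
            have hv1' : v - 1 + 1 = v := by omega
            rw [hv1']
            exact ih v k' _ (by omega) hk'len
              (fun m' hm' hmk => by have := hpre2 m' hm' hmk; omega)
    · rw [if_neg h1, if_neg h1]


-- ===== VERDICT (by name: the statement is the Claim_ definition above) =====
theorem message_chunks_py_spec : Claim_equal_message_chunks_py := by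
  intro message chunk_size _hdom hpre
  unfold Spec_message_chunks_py message_chunks_py message_chunks_py_alt
  by_cases hempty : message = ""
  · simp [hempty]
  · rcases hpre with h | hcs
    · exact absurd h hempty
    · simp only [hempty, if_false]
      exact loop_eq message.toList message chunk_size
        (max 12 (PySem.Int.floordiv chunk_size 2)) hcs (le_max_left _ _)
        (message.toList.length + 1) 0 0 [] le_rfl (Nat.zero_le _) (by omega)
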